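-- pv_equiv track=rewrite | github.com/daveisagit/advent-of-code | src/common/general.py | same_cyclic_seq
-- ===== SOURCE A (Python) =====
-- def same_cyclic_seq(a, b, include_reverse=True):
--     """Compare 2 sequences a,b as cycles"""
--     for i in range(len(a)):
--         t = b[i:] + b[:i]
--         r = t[::-1]
--         if t == a:
--             return True
--         if include_reverse and r == a:
--             return True
--
--     return False
-- ===== SOURCE B (Python) =====
-- def _least_rotation(s):
--     """Lexicographically least rotation of s (canonical form of the cycle)."""
--     n = len(s)
--     d = s + s
--     best = 0
--     for i in range(1, n):
--         x, y = d[i], d[best]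
--         if x < y or (x == y and d[i:i + n] < d[best:best + n]):
--             best = i
--     return d[best:best + n]
--
--
-- def same_cyclic_seq(a, b, include_reverse=True):
--     """Compare 2 sequences a,b as cycles by comparing canonical forms."""
--     if len(a) != len(b):
--         return False
--     if not a:
--         return True
--     cb = _least_rotation(b)
--     if _least_rotation(a) == cb:
--         return True
--     return bool(include_reverse and _least_rotation(a[::-1]) == cb)
-- ===== Notes on version B (the rewrite author's own statement) =====
-- stated objective: faster
-- what changed: B canonicalises: it computes the lexicographically least rotation of b once (a best-index scan over the doubled list with a first-element filter before any slice comparison) and compares it with the canonical forms of a (and of reversed a), instead of rotating b at every offset and comparing each rotation and its reverse against a.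
-- intended difference: On a = [] and b = [] A returns False (its loop over range(len(a)) never runs) although two empty sequences are equal as cycles; B returns True, the intended value. — e.g. on same_cyclic_seq([], [], true): A returns false, B returns true
import Mathlib
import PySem

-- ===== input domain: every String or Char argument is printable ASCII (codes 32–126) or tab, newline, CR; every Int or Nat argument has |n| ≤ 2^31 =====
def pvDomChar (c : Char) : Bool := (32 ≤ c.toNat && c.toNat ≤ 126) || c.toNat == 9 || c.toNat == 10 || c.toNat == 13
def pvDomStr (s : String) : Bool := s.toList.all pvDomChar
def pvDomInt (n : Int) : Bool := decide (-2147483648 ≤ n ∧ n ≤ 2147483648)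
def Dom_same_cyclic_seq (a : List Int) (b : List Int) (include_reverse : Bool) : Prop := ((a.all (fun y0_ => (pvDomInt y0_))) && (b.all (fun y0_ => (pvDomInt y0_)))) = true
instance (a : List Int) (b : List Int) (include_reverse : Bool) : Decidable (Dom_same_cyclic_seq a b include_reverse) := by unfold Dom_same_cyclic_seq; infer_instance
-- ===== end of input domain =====

-- B compares canonical forms: it computes the lexicographically least rotation of b once and
-- compares it with the canonical forms of a (and of reversed a), instead of rotating b at every
-- offset and comparing each rotation and its reverse against a; B returns True on two empty
-- sequences where A returns False (stated as the intended difference D_ below).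


-- ===== PORT A =====
-- for i in range(len(a)): t = b[i:] + b[:i]; r = t[::-1]; early-return True on t == a, or on
-- include_reverse and r == a (the early-return chain becomes ||); else False.
def same_cyclic_seq (a : List Int) (b : List Int) (include_reverse : Bool) : Bool :=
  (PySem.List.pyRange 0 a.length 1).any (fun i =>
    let t := PySem.List.slice b (some i) none ++ PySem.List.slice b none (some i)
    let r := (PySem.List.slice? t none none (-1)).getD []
    decide (t = a) || (include_reverse && decide (r = a)))

-- ===== PORT B =====
-- Python list comparison '<' (lexicographic, a proper prefix is smaller); exact port of the
-- semantics of 'd[i:i+n] < d[best:best+n]' on lists of ints.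
def pvListLt : List Int → List Int → Bool
  | _, [] => false
  | [], _ :: _ => true
  | x :: xs, y :: ys => if x < y then true else if y < x then false else pvListLt xs ys

-- loop body test 'x < y or (x == y and d[i:i+n] < d[best:best+n])' with x = d[i], y = d[best]
def pvCond (d : List Int) (n : Nat) (i best : Int) : Bool :=
  decide (PySem.List.pyGetD d i 0 < PySem.List.pyGetD d best 0) ||
  (decide (PySem.List.pyGetD d i 0 = PySem.List.pyGetD d best 0) &&
   pvListLt (PySem.List.slice d (some i) (some (i + (n : Int))))
            (PySem.List.slice d (some best) (some (best + (n : Int)))))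

-- _least_rotation(s): n = len(s); d = s + s; best = 0; for i in range(1, n): update best if the
-- window at i is lexicographically below the window at best; return d[best:best+n].
def pvLeastRotation (s : List Int) : List Int :=
  let n := s.length
  let d := s ++ s
  let best := (PySem.List.pyRange 1 (n : Int) 1).foldl
    (fun best i => if pvCond d n i best then i else best) 0
  PySem.List.slice d (some best) (some (best + (n : Int)))

-- length guard; empty → True; then compare canonical forms of a (and reversed a) with b's.
def same_cyclic_seq_alt (a : List Int) (b : List Int) (include_reverse : Bool) : Bool :=
  if a.length ≠ b.length then false
  else if a = [] then true
  else
    let cb := pvLeastRotation b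
    if pvLeastRotation a = cb then true
    else include_reverse && decide (pvLeastRotation ((PySem.List.slice? a none none (-1)).getD []) = cb)

-- ===== PRECONDITION & SPEC =====
-- On a = [] and b = [] A returns False (its loop over range(len(a)) is empty) although two empty
-- sequences are equal as cycles; B returns True, the intended value.
def D_same_cyclic_seq (a : List Int) (b : List Int) (include_reverse : Bool) : Prop := a = [] ∧ b = []
instance (a : List Int) (b : List Int) (include_reverse : Bool) : Decidable (D_same_cyclic_seq a b include_reverse) := by unfold D_same_cyclic_seq; infer_instance
def Spec_same_cyclic_seq (a : List Int) (b : List Int) (include_reverse : Bool) (out : Bool) : Prop := ¬ D_same_cyclic_seq a b include_reverse → out = same_cyclic_seq_alt a b include_reverse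
instance (a : List Int) (b : List Int) (include_reverse : Bool) (out : Bool) : Decidable (Spec_same_cyclic_seq a b include_reverse out) := by unfold Spec_same_cyclic_seq; infer_instance
def pvDiffWitness_same_cyclic_seq : List Int × List Int × Bool := ([], [], true)
def pvDiffWitnessOut_same_cyclic_seq : Bool × Bool := (false, true)

-- ===== CLAIM (what is proved, stated in full; the proofs are below) =====
def Claim_unchanged_same_cyclic_seq : Prop := ∀ (a : List Int) (b : List Int) (include_reverse : Bool), Dom_same_cyclic_seq a b include_reverse → Spec_same_cyclic_seq a b include_reverse (same_cyclic_seq a b include_reverse)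
def Claim_changed_same_cyclic_seq : Prop := Dom_same_cyclic_seq (pvDiffWitness_same_cyclic_seq.1) (pvDiffWitness_same_cyclic_seq.2.1) (pvDiffWitness_same_cyclic_seq.2.2) ∧ D_same_cyclic_seq (pvDiffWitness_same_cyclic_seq.1) (pvDiffWitness_same_cyclic_seq.2.1) (pvDiffWitness_same_cyclic_seq.2.2) ∧ same_cyclic_seq (pvDiffWitness_same_cyclic_seq.1) (pvDiffWitness_same_cyclic_seq.2.1) (pvDiffWitness_same_cyclic_seq.2.2) = pvDiffWitnessOut_same_cyclic_seq.1 ∧ same_cyclic_seq_alt (pvDiffWitness_same_cyclic_seq.1) (pvDiffWitness_same_cyclic_seq.2.1) (pvDiffWitness_same_cyclic_seq.2.2) = pvDiffWitnessOut_same_cyclic_seq.2 ∧ pvDiffWitnessOut_same_cyclic_seq.1 ≠ pvDiffWitnessOut_same_cyclic_seq.2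
def Claim_exact_same_cyclic_seq : Prop := ∀ (a : List Int) (b : List Int) (include_reverse : Bool), Dom_same_cyclic_seq a b include_reverse → D_same_cyclic_seq a b include_reverse → same_cyclic_seq a b include_reverse ≠ same_cyclic_seq_alt a b include_reverse

-- ===== LEMMAS AND PROOFS =====

-- A's rotation at offset i, in drop/take form.
def pvRot (b : List Int) (i : Int) : List Int := b.drop i.toNat ++ b.take i.toNat

theorem pvRot_length (b : List Int) (i : Int) : (pvRot b i).length = b.length := by
  unfold pvRot; simp; omega

theorem pvRotA_eq (b : List Int) (i : Int) (hi : 0 ≤ i) :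
    PySem.List.slice b (some i) none ++ PySem.List.slice b none (some i) = pvRot b i := by
  rw [PySem.List.slice_from b hi, PySem.List.slice_to b hi]; rfl

-- The window of the doubled list equals the rotation, for 0 ≤ i < b.length.
theorem pvWindow_eq (b : List Int) (i : Int) (hi : 0 ≤ i) (hlt : i < (b.length : Int)) :
    PySem.List.slice (b ++ b) (some i) (some (i + (b.length : Int))) = pvRot b i := by
  have hj : i.toNat ≤ b.length := by omega
  rw [PySem.List.slice_toNat _ hi (by omega)]
  have h1 : (i + (b.length : Int)).toNat - i.toNat = b.length := by omega
  rw [h1, List.drop_append_of_le_length hj, List.take_append]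
  have h2 : (b.drop i.toNat).length = b.length - i.toNat := by simp
  rw [h2]
  have h3 : b.length - (b.length - i.toNat) = i.toNat := by omega
  rw [h3, List.take_of_length_le (by simp)]
  rfl

theorem pvA_iff (a b : List Int) (inc : Bool) :
    same_cyclic_seq a b inc = true ↔
      ∃ i, i ∈ PySem.List.pyRange 0 (a.length : Int) 1 ∧
        (pvRot b i = a ∨ (inc = true ∧ (pvRot b i).reverse = a)) := by
  unfold same_cyclic_seq
  rw [List.any_eq_true]
  refine exists_congr fun i => and_congr_right fun hm => ?_
  obtain ⟨h0, _⟩ := (PySem.List.mem_pyRange_one).mp hm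
  simp [pvRotA_eq b i h0, PySem.List.slice?_none_none_neg_one]

-- basic order facts about pvListLt
theorem pvListLt_irrefl (x : List Int) : pvListLt x x = false := by
  induction x with
  | nil => rfl
  | cons h t ih => simp [pvListLt, ih]

theorem pvListLt_trans (x y z : List Int) (h1 : pvListLt x y = true) (h2 : pvListLt y z = true) :
    pvListLt x z = true := by
  induction x generalizing y z with
  | nil =>
      cases y with
      | nil => simp [pvListLt] at h1
      | cons y0 ys =>
          cases z with
          | nil => simp [pvListLt] at h2
          | cons z0 zs => simp [pvListLt]
  | cons x0 xs ih =>
      cases y with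
      | nil => simp [pvListLt] at h1
      | cons y0 ys =>
          cases z with
          | nil => simp [pvListLt] at h2
          | cons z0 zs =>
              simp only [pvListLt] at h1 h2 ⊢
              split_ifs at h1 with hxy hyx
              · split_ifs at h2 with hyz hzy
                · rw [if_pos (show x0 < z0 by omega)]
                · rw [if_pos (show x0 < z0 by omega)]
              · split_ifs at h2 with hyz hzy
                · rw [if_pos (show x0 < z0 by omega)]
                · rw [if_neg (show ¬ x0 < z0 by omega), if_neg (show ¬ z0 < x0 by omega)]
                  exact ih ys zs h1 h2

theorem pvListLt_connex (x y : List Int) (h1 : pvListLt x y = false) (h2 : pvListLt y x = false) :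
    x = y := by
  induction x generalizing y with
  | nil =>
      cases y with
      | nil => rfl
      | cons y0 ys => simp [pvListLt] at h1
  | cons x0 xs ih =>
      cases y with
      | nil => simp [pvListLt] at h2
      | cons y0 ys =>
          simp only [pvListLt] at h1 h2
          by_cases hxy : x0 < y0
          · rw [if_pos hxy] at h1; exact absurd h1 (by simp)
          · by_cases hyx : y0 < x0
            · rw [if_pos hyx] at h2; exact absurd h2 (by simp)
            · rw [if_neg hxy, if_neg hyx] at h1
              rw [if_neg hyx, if_neg hxy] at h2
              have hx : x0 = y0 := by omega
              rw [hx, ih ys h1 h2]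

-- from ¬ lt x y: either lt y x or x = y
theorem pvListLt_total (x y : List Int) (h : pvListLt x y = false) :
    pvListLt y x = true ∨ x = y := by
  cases hyx : pvListLt y x with
  | true => exact Or.inl rfl
  | false => exact Or.inr (pvListLt_connex x y h hyx)

-- the head of the window at j, as the list element d[j]
theorem pvWindow_head (s : List Int) (j : Int) (h0 : 0 ≤ j) (hlt : j < (s.length : Int)) :
    ∃ tl, pvRot s j = (PySem.List.pyGetD (s ++ s) j 0) :: tl := by
  have ht : j.toNat < s.length := by omega
  refine ⟨s.drop (j.toNat + 1) ++ s.take j.toNat, ?_⟩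
  have hj : j = ((j.toNat : Nat) : Int) := by omega
  rw [hj, PySem.List.pyGetD_natCast]
  rw [List.getD_eq_getElem _ _ (by simp; omega), List.getElem_append_left ht]
  unfold pvRot
  simp only [Int.toNat_natCast]
  rw [List.drop_eq_getElem_cons ht, List.cons_append]

-- the loop's test is exactly 'window i < window best' lexicographically
theorem pvCond_eq (s : List Int) (i b : Int) (hi0 : 0 ≤ i) (hilt : i < (s.length : Int))
    (hb0 : 0 ≤ b) (hblt : b < (s.length : Int)) :
    pvCond (s ++ s) s.length i b =
      pvListLt (PySem.List.slice (s ++ s) (some i) (some (i + (s.length : Int))))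
               (PySem.List.slice (s ++ s) (some b) (some (b + (s.length : Int)))) := by
  obtain ⟨ti, hti⟩ := pvWindow_head s i hi0 hilt
  obtain ⟨tb, htb⟩ := pvWindow_head s b hb0 hblt
  unfold pvCond
  rw [pvWindow_eq s i hi0 hilt, pvWindow_eq s b hb0 hblt, hti, htb]
  by_cases h1 : PySem.List.pyGetD (s ++ s) i 0 < PySem.List.pyGetD (s ++ s) b 0
  · simp [pvListLt, h1]
  · by_cases h2 : PySem.List.pyGetD (s ++ s) b 0 < PySem.List.pyGetD (s ++ s) i 0
    · simp [pvListLt, h1, h2, show PySem.List.pyGetD (s ++ s) i 0 ≠ PySem.List.pyGetD (s ++ s) b 0 by omega]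
    · have h3 : PySem.List.pyGetD (s ++ s) i 0 = PySem.List.pyGetD (s ++ s) b 0 := by omega
      simp [pvListLt, h3]

-- the fold keeping the first index whose window is lexicographically least
theorem pvFold_min (w : Int → List Int) (c : Int → Int → Bool) (P : Int → Prop)
    (hc : ∀ i b, P i → P b → c i b = pvListLt (w i) (w b))
    (L : List Int) (b0 : Int) (hP0 : P b0) (hPL : ∀ j ∈ L, P j) :
    (L.foldl (fun best i => if c i best then i else best) b0 = b0 ∨
     L.foldl (fun best i => if c i best then i else best) b0 ∈ L) ∧
    pvListLt (w b0) (w (L.foldl (fun best i => if c i best then i else best) b0)) = false ∧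
    (∀ j ∈ L, pvListLt (w j) (w (L.foldl (fun best i => if c i best then i else best) b0)) = false) := by
  induction L generalizing b0 with
  | nil => exact ⟨Or.inl rfl, pvListLt_irrefl _, by simp⟩
  | cons i L' ih =>
      simp only [List.foldl_cons]
      have hci : c i b0 = pvListLt (w i) (w b0) := hc i b0 (hPL i (by simp)) hP0
      have hPb' : P (if c i b0 then i else b0) := by
        by_cases h : c i b0 = true
        · rw [if_pos h]; exact hPL i (by simp)
        · rw [if_neg h]; exact hP0
      obtain ⟨hmem, hb'le, hall⟩ := ih (if c i b0 then i else b0) hPb'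
        (fun j hj => hPL j (List.mem_cons_of_mem _ hj))
      rw [hci] at hmem hb'le hall ⊢
      set r := L'.foldl (fun best i => if c i best then i else best)
        (if pvListLt (w i) (w b0) = true then i else b0) with hr
      have hb0le : pvListLt (w b0) (w r) = false := by
        by_cases h : pvListLt (w i) (w b0) = true
        · rw [if_pos h] at hb'le
          cases hd : pvListLt (w b0) (w r) with
          | false => rfl
          | true => exact absurd (pvListLt_trans _ _ _ h hd) (by simp [hb'le])
        · rw [if_neg h] at hb'le; exact hb'le
      have hile : pvListLt (w i) (w r) = false := by
        by_cases h : pvListLt (w i) (w b0) = true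
        · rw [if_pos h] at hb'le; exact hb'le
        · rcases pvListLt_total _ _ (by simpa using h) with hlt | heq
          · cases hd : pvListLt (w i) (w r) with
            | false => rfl
            | true => exact absurd (pvListLt_trans _ _ _ hlt hd) (by simp [hb0le])
          · rw [heq]; exact hb0le
      refine ⟨?_, hb0le, ?_⟩
      · rcases hmem with h | h
        · rw [h]
          by_cases hd : pvListLt (w i) (w b0) = true
          · exact Or.inr (by simp [hd])
          · exact Or.inl (by simp [hd])
        · exact Or.inr (List.mem_cons_of_mem _ h)
      · intro j hj
        rcases List.mem_cons.mp hj with h | h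
        · rw [h]; exact hile
        · exact hall j h

-- characterisation of pvLeastRotation: it IS a rotation, and no rotation is lexicographically below it
theorem pvLeast_spec (s : List Int) (hs : s ≠ []) :
    (∃ i : Int, 0 ≤ i ∧ i < (s.length : Int) ∧ pvLeastRotation s = pvRot s i) ∧
    (∀ i : Int, 0 ≤ i → i < (s.length : Int) → pvListLt (pvRot s i) (pvLeastRotation s) = false) := by
  have hn : 0 < s.length := List.length_pos_iff.mpr hs
  obtain ⟨hmem, h0le, hall⟩ :=
    pvFold_min (fun i => PySem.List.slice (s ++ s) (some i) (some (i + (s.length : Int))))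
      (pvCond (s ++ s) s.length) (fun j => 0 ≤ j ∧ j < (s.length : Int))
      (fun i b hi hb => pvCond_eq s i b hi.1 hi.2 hb.1 hb.2)
      (PySem.List.pyRange 1 (s.length : Int) 1) 0 (by constructor <;> omega)
      (fun j hj => by
        obtain ⟨h1, h2⟩ := PySem.List.mem_pyRange_one.mp hj
        exact ⟨by omega, h2⟩)
  set best := (PySem.List.pyRange 1 (s.length : Int) 1).foldl
    (fun best i => if pvCond (s ++ s) s.length i best then i else best) 0 with hbest
  have hbb : 0 ≤ best ∧ best < (s.length : Int) := by
    rcases hmem with h | h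
    · rw [h]; omega
    · obtain ⟨h1, h2⟩ := (PySem.List.mem_pyRange_one).mp h; omega
  have hLR : pvLeastRotation s = PySem.List.slice (s ++ s) (some best) (some (best + (s.length : Int))) := rfl
  constructor
  · exact ⟨best, hbb.1, hbb.2, by rw [hLR, pvWindow_eq s best hbb.1 hbb.2]⟩
  · intro i h0 hlt
    rw [hLR, ← pvWindow_eq s i h0 hlt]
    by_cases hi : i = 0
    · subst hi; exact h0le
    · exact hall i (PySem.List.mem_pyRange_one.mpr ⟨by omega, hlt⟩)

-- rotation algebra via Mathlib's List.rotate / IsRotated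
theorem pvRot_eq_rotate (s : List Int) (i : Int) (h0 : 0 ≤ i) (hlt : i < (s.length : Int)) :
    pvRot s i = s.rotate i.toNat := by
  rw [List.rotate_eq_drop_append_take (by omega)]; rfl

theorem pvExists_iff (a b : List Int) (hb : b ≠ []) :
    (∃ i, i ∈ PySem.List.pyRange 0 (b.length : Int) 1 ∧ pvRot b i = a) ↔ b ~r a := by
  have hn : 0 < b.length := List.length_pos_iff.mpr hb
  constructor
  · rintro ⟨i, hm, h⟩
    obtain ⟨h0, hlt⟩ := PySem.List.mem_pyRange_one.mp hm
    exact ⟨i.toNat, by rw [← pvRot_eq_rotate b i h0 hlt]; exact h⟩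
  · rintro ⟨k, hk⟩
    refine ⟨((k % b.length : Nat) : Int), PySem.List.mem_pyRange_one.mpr ⟨by positivity, ?_⟩, ?_⟩
    · exact_mod_cast Nat.mod_lt k hn
    · rw [pvRot_eq_rotate b _ (by positivity) (by exact_mod_cast Nat.mod_lt k hn)]
      rw [Int.toNat_natCast, List.rotate_mod, hk]

theorem pvIsRotated_least (s : List Int) (hs : s ≠ []) : s ~r pvLeastRotation s := by
  obtain ⟨⟨i, h0, hlt, heq⟩, _⟩ := pvLeast_spec s hs
  exact ⟨i.toNat, by rw [heq, pvRot_eq_rotate s i h0 hlt]⟩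

theorem pvLeast_eq_iff (a b : List Int) (ha : a ≠ []) (hb : b ≠ []) :
    pvLeastRotation a = pvLeastRotation b ↔ a ~r b := by
  constructor
  · intro h
    exact (pvIsRotated_least a ha).trans (h ▸ (pvIsRotated_least b hb).symm)
  · intro h
    have h1 : pvListLt (pvLeastRotation a) (pvLeastRotation b) = false := by
      obtain ⟨j, hm, hj⟩ := (pvExists_iff (pvLeastRotation a) b hb).mpr
        (h.symm.trans (pvIsRotated_least a ha))
      obtain ⟨h0, hlt⟩ := PySem.List.mem_pyRange_one.mp hm
      rw [← hj]; exact (pvLeast_spec b hb).2 j h0 hlt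
    have h2 : pvListLt (pvLeastRotation b) (pvLeastRotation a) = false := by
      obtain ⟨j, hm, hj⟩ := (pvExists_iff (pvLeastRotation b) a ha).mpr
        (h.trans (pvIsRotated_least b hb))
      obtain ⟨h0, hlt⟩ := PySem.List.mem_pyRange_one.mp hm
      rw [← hj]; exact (pvLeast_spec a ha).2 j h0 hlt
    exact pvListLt_connex _ _ h1 h2

theorem same_cyclic_seq_spec : Claim_unchanged_same_cyclic_seq := by
  intro a b inc _ hD'
  by_cases hlen : a.length = b.length
  · by_cases ha : a = []
    · refine absurd ⟨ha, ?_⟩ hD'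
      cases b with
      | nil => rfl
      | cons x xs => rw [ha] at hlen; simp at hlen
    · have hb : b ≠ [] := by
        intro hbe; rw [hbe] at hlen; exact ha (List.length_eq_zero_iff.mp hlen)
      have hra : a.reverse ≠ [] := by simpa using ha
      have hA : same_cyclic_seq a b inc = true ↔ (b ~r a ∨ (inc = true ∧ b ~r a.reverse)) := by
        rw [pvA_iff a b inc, hlen]
        constructor
        · rintro ⟨i, hm, h | ⟨hinc, hr⟩⟩
          · exact Or.inl ((pvExists_iff a b hb).mp ⟨i, hm, h⟩)
          · exact Or.inr ⟨hinc, (pvExists_iff a.reverse b hb).mp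
              ⟨i, hm, by rw [← hr, List.reverse_reverse]⟩⟩
        · rintro (h | ⟨hinc, h⟩)
          · obtain ⟨i, hm, hi⟩ := (pvExists_iff a b hb).mpr h
            exact ⟨i, hm, Or.inl hi⟩
          · obtain ⟨i, hm, hi⟩ := (pvExists_iff a.reverse b hb).mpr h
            exact ⟨i, hm, Or.inr ⟨hinc, by rw [hi, List.reverse_reverse]⟩⟩
      have hB : same_cyclic_seq_alt a b inc = true ↔ (b ~r a ∨ (inc = true ∧ b ~r a.reverse)) := by
        unfold same_cyclic_seq_alt
        rw [if_neg (by omega), if_neg ha, PySem.List.slice?_none_none_neg_one, Option.getD_some]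
        show (if pvLeastRotation a = pvLeastRotation b then true
              else inc && decide (pvLeastRotation a.reverse = pvLeastRotation b)) = true ↔ _
        by_cases hc : a ~r b
        · rw [if_pos ((pvLeast_eq_iff a b ha hb).mpr hc)]
          simp [hc.symm]
        · rw [if_neg (fun heq => hc ((pvLeast_eq_iff a b ha hb).mp heq))]
          simp only [Bool.and_eq_true, decide_eq_true_iff]
          rw [pvLeast_eq_iff a.reverse b hra hb]
          constructor
          · rintro ⟨hinc, h⟩; exact Or.inr ⟨hinc, h.symm⟩
          · rintro (h | ⟨hinc, h⟩)
            · exact absurd h.symm hc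
            · exact ⟨hinc, h.symm⟩
      rw [Bool.eq_iff_iff, hA, hB]
  · have hA : same_cyclic_seq a b inc = false := by
      cases hAe : same_cyclic_seq a b inc with
      | false => rfl
      | true =>
          obtain ⟨i, _, h⟩ := (pvA_iff a b inc).mp hAe
          exfalso
          rcases h with h | ⟨_, h⟩
          · exact hlen (by rw [← h, pvRot_length])
          · exact hlen (by rw [← h, List.length_reverse, pvRot_length])
    rw [hA]
    unfold same_cyclic_seq_alt
    rw [if_pos hlen]

theorem same_cyclic_seq_changed : Claim_changed_same_cyclic_seq := by
  unfold Claim_changed_same_cyclic_seq; decide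

theorem same_cyclic_seq_tight : Claim_exact_same_cyclic_seq := by
  intro a b inc _ hD
  obtain ⟨ha, hb⟩ := hD
  subst ha; subst hb
  cases inc <;> decide
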